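-- pv_equiv track=rewrite | github.com/rahul-754/nameqc | update_name_qc_with_first_char.py | can_match_all
-- ===== SOURCE A (Python) =====
-- def can_match_all(initials1, initials2):
--     """
--     Return True if either list becomes empty after matching initials,
--     regardless of order or leftovers in the other list.
--     """
--     i1 = [c.lower() for c in initials1]
--     i2 = [c.lower() for c in initials2]
--
--     # Match and remove shared initials
--     for c in initials1:
--         if c in i2:
--             i2.remove(c)
--             i1.remove(c)
--
--     # Return true if either list is fully matched
--     return len(i1) == 0 or len(i2) == 0
-- ===== SOURCE B (Python) =====
-- def can_match_all(initials1, initials2):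
--     """
--     Return True if, matching initials case-insensitively, one list is
--     fully covered by the other (order and leftovers in the other list
--     don't matter).
--     """
--     s1 = sorted(c.lower() for c in initials1)
--     s2 = sorted(c.lower() for c in initials2)
--     matches = 0
--     i = 0
--     j = 0
--     while i < len(s1) and j < len(s2):
--         if s1[i] == s2[j]:
--             matches += 1
--             i += 1
--             j += 1
--         elif s1[i] < s2[j]:
--             i += 1
--         else:
--             j += 1
--     return matches == len(s1) or matches == len(s2)
-- ===== Notes on version B (the rewrite author's own statement) =====
-- stated objective: faster
-- what changed: Replaces A's per-element 'in'/remove scans over mutating lists with one sort of each lowered list and a single two-pointer merge counting the multiset-intersection size.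
-- intended difference: On inputs where case-insensitive matching fully covers one list but A's accidental case-sensitive comparison of original-case initials1 against the lowered initials2 covers neither, A returns False and B returns True; B's value is intended since the function is documented to match initials regardless of case artifacts and A itself lowers both lists. — e.g. on can_match_all(["A"], ["a"]): A returns false, B returns true
import Mathlib
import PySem

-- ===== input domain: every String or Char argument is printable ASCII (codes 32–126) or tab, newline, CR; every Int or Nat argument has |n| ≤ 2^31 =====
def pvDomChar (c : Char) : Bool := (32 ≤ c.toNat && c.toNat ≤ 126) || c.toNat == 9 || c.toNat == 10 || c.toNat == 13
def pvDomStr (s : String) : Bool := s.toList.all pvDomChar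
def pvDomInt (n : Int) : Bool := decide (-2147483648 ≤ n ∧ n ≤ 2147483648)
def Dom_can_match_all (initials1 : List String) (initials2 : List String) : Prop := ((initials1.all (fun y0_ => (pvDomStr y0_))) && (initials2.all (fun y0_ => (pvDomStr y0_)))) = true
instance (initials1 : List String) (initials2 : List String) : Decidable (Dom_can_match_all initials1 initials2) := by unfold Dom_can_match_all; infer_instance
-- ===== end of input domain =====

-- B sorts both lowered lists once and counts matches with a two-pointer merge (faster);
-- unlike A it matches the first list case-insensitively too, the documented intent (see D_ below).

-- ===== PORT A =====
-- `remove?` returns none where Python would raise ValueError; the `.getD` fallback is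
-- provably unreachable (i2 only holds lower-stable strings, and i1 always still holds
-- a copy of any c found in i2 — see lemma can_match_all_fold_inv below).
def can_match_all (initials1 : List String) (initials2 : List String) : Bool :=
  let i1 := initials1.map PySem.Str.lower
  let i2 := initials2.map PySem.Str.lower
  let st := initials1.foldl
    (fun (st : List String × List String) c =>
      if st.2.contains c then
        ((PySem.List.remove? st.1 c).getD st.1, (PySem.List.remove? st.2 c).getD st.2)
      else st)
    (i1, i2)
  st.1.length == 0 || st.2.length == 0

-- ===== PORT B =====
-- the two-pointer merge loop of Source B, as structural recursion on the two sorted lists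
def mergeCount : List String → List String → Nat
  | a :: as, b :: bs =>
    if a == b then mergeCount as bs + 1
    else if a < b then mergeCount as (b :: bs)
    else mergeCount (a :: as) bs
  | _, _ => 0
termination_by xs ys => xs.length + ys.length

def can_match_all_alt (initials1 : List String) (initials2 : List String) : Bool :=
  let s1 := PySem.List.sorted (initials1.map PySem.Str.lower) (fun x => x) false
  let s2 := PySem.List.sorted (initials2.map PySem.Str.lower) (fun x => x) false
  let m := mergeCount s1 s2
  m == s1.length || m == s2.length

-- ===== PRECONDITION & SPEC =====
-- On inputs where case-insensitive matching fully covers one list but A's accidental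
-- case-sensitive comparison of original-case initials1 against the lowered initials2
-- covers neither, A returns False and B returns True; B's value is intended, since the
-- function is documented to match initials regardless of case artifacts (A lowers both).
def D_can_match_all (initials1 : List String) (initials2 : List String) : Prop :=
  ¬ ((initials1 : Multiset String) ≤ ((initials2.map PySem.Str.lower : List String) : Multiset String)
     ∨ ((initials2.map PySem.Str.lower : List String) : Multiset String) ≤ (initials1 : Multiset String))
  ∧ (((initials1.map PySem.Str.lower : List String) : Multiset String) ≤ ((initials2.map PySem.Str.lower : List String) : Multiset String)
     ∨ ((initials2.map PySem.Str.lower : List String) : Multiset String) ≤ ((initials1.map PySem.Str.lower : List String) : Multiset String))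
instance (initials1 : List String) (initials2 : List String) : Decidable (D_can_match_all initials1 initials2) := by unfold D_can_match_all; infer_instance

def Spec_can_match_all (initials1 : List String) (initials2 : List String) (out : Bool) : Prop := ¬ D_can_match_all initials1 initials2 → out = can_match_all_alt initials1 initials2
instance (initials1 : List String) (initials2 : List String) (out : Bool) : Decidable (Spec_can_match_all initials1 initials2 out) := by unfold Spec_can_match_all; infer_instance

def pvDiffWitness_can_match_all : List String × List String := (["A"], ["a"])
def pvDiffWitnessOut_can_match_all : Bool × Bool := (false, true)

-- ===== CLAIM (what is proved, stated in full; the proofs are below) =====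
def Claim_unchanged_can_match_all : Prop := ∀ (initials1 : List String) (initials2 : List String), Dom_can_match_all initials1 initials2 → Spec_can_match_all initials1 initials2 (can_match_all initials1 initials2)
def Claim_changed_can_match_all : Prop := Dom_can_match_all (pvDiffWitness_can_match_all.1) (pvDiffWitness_can_match_all.2) ∧ D_can_match_all (pvDiffWitness_can_match_all.1) (pvDiffWitness_can_match_all.2) ∧ can_match_all (pvDiffWitness_can_match_all.1) (pvDiffWitness_can_match_all.2) = pvDiffWitnessOut_can_match_all.1 ∧ can_match_all_alt (pvDiffWitness_can_match_all.1) (pvDiffWitness_can_match_all.2) = pvDiffWitnessOut_can_match_all.2 ∧ pvDiffWitnessOut_can_match_all.1 ≠ pvDiffWitnessOut_can_match_all.2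
def Claim_exact_can_match_all : Prop := ∀ (initials1 : List String) (initials2 : List String), Dom_can_match_all initials1 initials2 → D_can_match_all initials1 initials2 → can_match_all initials1 initials2 ≠ can_match_all_alt initials1 initials2

-- ===== LEMMAS AND PROOFS =====

theorem char_le_toNat (a b : Char) : a ≤ b ↔ a.toNat ≤ b.toNat := by
  rw [Char.le_def]; exact UInt32.le_iff_toNat_le

theorem lowerChar_idem (c : Char) :
    PySem.Chars.lowerChar (PySem.Chars.lowerChar c) = PySem.Chars.lowerChar c := by
  unfold PySem.Chars.lowerChar
  by_cases h : PySem.Chars.isupper c = true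
  · simp only [h, if_pos]
    have hZ : 65 ≤ c.toNat ∧ c.toNat ≤ 90 := by
      simp [PySem.Chars.isupper, char_le_toNat] at h
      exact ⟨by have : (65:Nat) = 'A'.toNat := rfl; omega,
             by have : (90:Nat) = 'Z'.toNat := rfl; omega⟩
    have hv : Nat.isValidChar (c.toNat + 32) := Or.inl (by omega)
    have ht : (Char.ofNat (c.toNat + 32)).toNat = c.toNat + 32 := by
      simp [Char.ofNat, hv, Char.ofNatAux]; omega
    have hni : PySem.Chars.isupper (Char.ofNat (c.toNat + 32)) = false := by
      simp only [PySem.Chars.isupper, char_le_toNat, Bool.and_eq_false_iff,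
        decide_eq_false_iff_not]
      right; rw [ht]; have hA : 'Z'.toNat = 90 := rfl; omega
    simp [hni]
  · simp [h]

theorem lower_idem (s : String) :
    PySem.Str.lower (PySem.Str.lower s) = PySem.Str.lower s := by
  simp only [PySem.Str.lower, PySem.Chars.lower]
  congr 1
  simp only [String.toList_ofList, List.map_map]
  exact List.map_congr_left (fun a _ => lowerChar_idem a)

-- A's matching loop: both state lists shrink by exactly the multiset-intersection card.
theorem can_match_all_fold_inv (cs : List String) :
    ∀ (i1 i2 : List String),
      (∀ c ∈ i2, PySem.Str.lower c = c) →
      (∀ v, PySem.Str.lower v = v → cs.count v ≤ i1.count v) →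
      ((cs.foldl
        (fun (st : List String × List String) c =>
          if st.2.contains c then
            ((PySem.List.remove? st.1 c).getD st.1, (PySem.List.remove? st.2 c).getD st.2)
          else st) (i1, i2)).1.length + (((cs : Multiset String)) ∩ (i2 : Multiset String)).card = i1.length
      ∧ (cs.foldl
        (fun (st : List String × List String) c =>
          if st.2.contains c then
            ((PySem.List.remove? st.1 c).getD st.1, (PySem.List.remove? st.2 c).getD st.2)
          else st) (i1, i2)).2.length + (((cs : Multiset String)) ∩ (i2 : Multiset String)).card = i2.length) := by
  induction cs with
  | nil => intro i1 i2 _ _; simp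
  | cons c cs ih =>
    intro i1 i2 H2 H1
    by_cases hc : i2.contains c = true
    · have hcmem : c ∈ i2 := by simpa using hc
      have hlc : PySem.Str.lower c = c := H2 c hcmem
      have hc1 : c ∈ i1 := by
        have := H1 c hlc
        simp only [List.count_cons_self] at this
        exact List.count_pos_iff.mp (by omega)
      have hr1 : PySem.List.remove? i1 c = some (i1.erase c) :=
        PySem.List.remove?_eq_some_erase i1 c hc1
      have hr2 : PySem.List.remove? i2 c = some (i2.erase c) :=
        PySem.List.remove?_eq_some_erase i2 c hcmem
      have hstep := ih (i1.erase c) (i2.erase c)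
        (fun d hd => H2 d (List.mem_of_mem_erase hd))
        (by
          intro v hv
          by_cases hvc : v = c
          · subst hvc
            have := H1 v hv
            simp only [List.count_cons_self] at this
            rw [List.count_erase_self]
            omega
          · have := H1 v hv
            rw [List.count_cons_of_ne (by exact fun h => hvc h.symm)] at this
            rw [List.count_erase_of_ne hvc]
            exact this)
      have hcard : (((c :: cs : List String) : Multiset String) ∩ (i2 : Multiset String)).card
          = (((cs : Multiset String)) ∩ ((i2.erase c : List String) : Multiset String)).card + 1 := by
        rw [← Multiset.cons_coe, Multiset.cons_inter_of_pos _ hcmem]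
        rw [Multiset.coe_erase]
        simp
      simp only [List.foldl_cons, hc, if_pos, hr1, hr2, Option.getD_some]
      constructor
      · rw [hcard]
        have := hstep.1
        have hlen : (i1.erase c).length + 1 = i1.length := by
          rw [List.length_erase_of_mem hc1]
          have : i1.length ≠ 0 := by
            intro h; rw [List.length_eq_zero_iff] at h; subst h; simp at hc1
          omega
        omega
      · rw [hcard]
        have := hstep.2
        have hlen : (i2.erase c).length + 1 = i2.length := by
          rw [List.length_erase_of_mem hcmem]
          have : i2.length ≠ 0 := by
            intro h; rw [List.length_eq_zero_iff] at h; subst h; simp at hcmem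
          omega
        omega
    · have hcmem : c ∉ i2 := by simpa using hc
      have hcard : (((c :: cs : List String) : Multiset String) ∩ (i2 : Multiset String)).card
          = (((cs : Multiset String)) ∩ (i2 : Multiset String)).card := by
        rw [← Multiset.cons_coe, Multiset.cons_inter_of_neg _ hcmem]
      simp only [List.foldl_cons, hc, if_neg, Bool.false_eq_true, not_false_iff]
      rw [hcard]
      exact ih i1 i2 H2 (by
        intro v hv
        have := H1 v hv
        have hle : cs.count v ≤ (c :: cs).count v := by
          by_cases h : c = v <;> simp [h]
        omega)

-- the two-pointer merge over sorted lists computes the multiset-intersection card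
theorem mergeCount_eq_inter_card : ∀ (xs ys : List String),
    xs.Pairwise (· ≤ ·) → ys.Pairwise (· ≤ ·) →
    mergeCount xs ys = (((xs : Multiset String)) ∩ ((ys : Multiset String))).card := by
  intro xs ys
  induction xs, ys using mergeCount.induct with
  | case1 a as b bs hab ih =>
    intro hx hy
    have hab' : a = b := by simpa using hab
    subst hab'
    rw [mergeCount]
    simp only [BEq.rfl, if_pos]
    rw [ih hx.of_cons hy.of_cons]
    rw [show ((a :: as : List String) : Multiset String) = a ::ₘ (as : Multiset String) from
      (Multiset.cons_coe _ _).symm]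
    rw [Multiset.cons_inter_of_pos _ (by simp : a ∈ ((a :: bs : List String) : Multiset String))]
    rw [show (((a :: bs : List String) : Multiset String)).erase a = (bs : Multiset String) by simp]
    simp
  | case2 a as b bs hab hlt ih =>
    intro hx hy
    have hnab : ¬ a = b := by simpa using hab
    rw [mergeCount]
    simp only [hab, hlt, if_pos, if_neg, Bool.false_eq_true, not_false_iff]
    have hnm : a ∉ ((b :: bs : List String) : Multiset String) := by
      simp only [Multiset.mem_coe, List.mem_cons]
      rintro (rfl | hmem)
      · exact hnab rfl
      · exact absurd (List.rel_of_pairwise_cons hy hmem) (not_le.mpr hlt)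
    rw [show ((a :: as : List String) : Multiset String) = a ::ₘ (as : Multiset String) from
      (Multiset.cons_coe _ _).symm]
    rw [Multiset.cons_inter_of_neg _ hnm]
    exact ih hx.of_cons hy
  | case3 a as b bs hab hlt ih =>
    intro hx hy
    have hnab : ¬ a = b := by simpa using hab
    have hba : b < a := by
      rcases lt_trichotomy a b with h | h | h
      · exact absurd h (by simpa using hlt)
      · exact absurd h hnab
      · exact h
    rw [mergeCount]
    simp only [hab, hlt, if_neg, Bool.false_eq_true, not_false_iff]
    have hnm : b ∉ ((a :: as : List String) : Multiset String) := by
      simp only [Multiset.mem_coe, List.mem_cons]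
      rintro (rfl | hmem)
      · exact hnab rfl
      · exact absurd (List.rel_of_pairwise_cons hx hmem) (not_le.mpr hba)
    rw [Multiset.inter_comm]
    rw [show ((b :: bs : List String) : Multiset String) = b ::ₘ (bs : Multiset String) from
      (Multiset.cons_coe _ _).symm]
    rw [Multiset.cons_inter_of_neg _ hnm]
    rw [Multiset.inter_comm]
    exact ih hx hy.of_cons
  | case4 xs ys h =>
    intro _ _
    cases xs with
    | nil => simp [mergeCount]
    | cons x xs =>
      cases ys with
      | nil => simp [mergeCount]
      | cons y ys => exact (h _ _ _ _ rfl rfl).elim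

theorem count_le_count_map_lower (v : String) (hv : PySem.Str.lower v = v) :
    ∀ (l : List String), l.count v ≤ (l.map PySem.Str.lower).count v := by
  intro l
  induction l with
  | nil => simp
  | cons a t ih =>
    simp only [List.map_cons, List.count_cons]
    by_cases h : a = v
    · subst h
      simp only [hv, BEq.rfl]
      have := ih
      omega
    · have : (a == v) = false := by simpa using h
      simp [this]
      have := ih
      omega

-- card of the intersection reaches a side's card exactly when that side is contained
theorem inter_card_eq_left {α : Type} [DecidableEq α] (s t : Multiset α) :
    (s ∩ t).card = s.card ↔ s ≤ t := by
  constructor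
  · intro h
    have he : s ∩ t = s :=
      Multiset.eq_of_le_of_card_le (Multiset.inter_le_left) (le_of_eq h.symm)
    exact he ▸ Multiset.inter_le_right
  · intro h
    have he : s ≤ s ∩ t := Multiset.le_inter le_rfl h
    exact congrArg Multiset.card (le_antisymm Multiset.inter_le_left he)

theorem inter_card_eq_right {α : Type} [DecidableEq α] (s t : Multiset α) :
    (s ∩ t).card = t.card ↔ t ≤ s := by
  rw [Multiset.inter_comm]; exact inter_card_eq_left t s

-- A's result, characterized by multiset containment
theorem can_match_all_iff (l1 l2 : List String) :
    can_match_all l1 l2 = true ↔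
      ((l1 : Multiset String) ≤ ((l2.map PySem.Str.lower : List String) : Multiset String)
       ∨ ((l2.map PySem.Str.lower : List String) : Multiset String) ≤ (l1 : Multiset String)) := by
  unfold can_match_all
  simp only []
  set i2 := l2.map PySem.Str.lower with hi2
  have H2 : ∀ c ∈ i2, PySem.Str.lower c = c := by
    intro c hc
    rw [hi2, List.mem_map] at hc
    obtain ⟨d, _, rfl⟩ := hc
    exact lower_idem d
  have hA := can_match_all_fold_inv l1 (l1.map PySem.Str.lower) i2 H2
    (fun v hv => count_le_count_map_lower v hv l1)
  have h1 := hA.1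
  have h2 := hA.2
  rw [List.length_map] at h1
  rw [Bool.or_eq_true, beq_iff_eq, beq_iff_eq]
  rw [← inter_card_eq_left (l1 : Multiset String) (i2 : Multiset String),
      ← inter_card_eq_right (l1 : Multiset String) (i2 : Multiset String)]
  have hcs : ((l1 : Multiset String) ∩ (i2 : Multiset String)).card
      = (l1 : Multiset String).card ↔
      (l1 : Multiset String).card - ((l1 : Multiset String) ∩ (i2 : Multiset String)).card = 0 := by
    have hle : ((l1 : Multiset String) ∩ (i2 : Multiset String)).card
        ≤ (l1 : Multiset String).card := Multiset.card_le_card Multiset.inter_le_left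
    omega
  simp only [Multiset.coe_card] at *
  omega

-- B's result, characterized by multiset containment of the two lowered lists
theorem can_match_all_alt_iff (l1 l2 : List String) :
    can_match_all_alt l1 l2 = true ↔
      (((l1.map PySem.Str.lower : List String) : Multiset String) ≤ ((l2.map PySem.Str.lower : List String) : Multiset String)
       ∨ ((l2.map PySem.Str.lower : List String) : Multiset String) ≤ ((l1.map PySem.Str.lower : List String) : Multiset String)) := by
  unfold can_match_all_alt
  simp only []
  set L1 := l1.map PySem.Str.lower with hL1
  set L2 := l2.map PySem.Str.lower with hL2
  have hB := mergeCount_eq_inter_card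
    (PySem.List.sorted L1 (fun x => x) false)
    (PySem.List.sorted L2 (fun x => x) false)
    (PySem.List.sorted_pairwise (xs := L1) (key := fun x => x))
    (PySem.List.sorted_pairwise (xs := L2) (key := fun x => x))
  have hperm1 : ((PySem.List.sorted L1 (fun x => x) false : List String) : Multiset String)
      = (L1 : Multiset String) := Multiset.coe_eq_coe.mpr (PySem.List.sorted_perm _ _ _)
  have hperm2 : ((PySem.List.sorted L2 (fun x => x) false : List String) : Multiset String)
      = (L2 : Multiset String) := Multiset.coe_eq_coe.mpr (PySem.List.sorted_perm _ _ _)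
  have hlen1 : (PySem.List.sorted L1 (fun x => x) false).length = L1.length :=
    (PySem.List.sorted_perm _ _ _).length_eq
  have hlen2 : (PySem.List.sorted L2 (fun x => x) false).length = L2.length :=
    (PySem.List.sorted_perm _ _ _).length_eq
  rw [hperm1, hperm2] at hB
  rw [Bool.or_eq_true, beq_iff_eq, beq_iff_eq, hB, hlen1, hlen2]
  rw [← inter_card_eq_left (L1 : Multiset String) (L2 : Multiset String),
      ← inter_card_eq_right (L1 : Multiset String) (L2 : Multiset String)]
  simp only [Multiset.coe_card]

-- A true implies B true (matching more case-insensitively can only cover more)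
theorem can_match_all_imp_alt (l1 l2 : List String) :
    can_match_all l1 l2 = true → can_match_all_alt l1 l2 = true := by
  rw [can_match_all_iff, can_match_all_alt_iff]
  intro h
  rcases h with h | h
  · left
    have hcomp : (l2.map PySem.Str.lower).map PySem.Str.lower = l2.map PySem.Str.lower := by
      rw [List.map_map]
      exact List.map_congr_left (fun a _ => lower_idem a)
    have hmap := Multiset.map_le_map (f := PySem.Str.lower) h
    rw [Multiset.map_coe, Multiset.map_coe, hcomp] at hmap
    exact hmap
  · right
    rw [Multiset.le_iff_count] at h ⊢
    intro v
    have := h v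
    by_cases hv : PySem.Str.lower v = v
    · calc Multiset.count v ((l2.map PySem.Str.lower : List String) : Multiset String)
          ≤ Multiset.count v (l1 : Multiset String) := this
        _ ≤ Multiset.count v ((l1.map PySem.Str.lower : List String) : Multiset String) := by
            simp only [Multiset.coe_count]
            exact count_le_count_map_lower v hv l1
    · have hz : Multiset.count v ((l2.map PySem.Str.lower : List String) : Multiset String) = 0 := by
        simp only [Multiset.coe_count, List.count_eq_zero]
        intro hmem
        rw [List.mem_map] at hmem
        obtain ⟨d, _, rfl⟩ := hmem
        exact hv (lower_idem d)
      omega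

-- ===== VERDICT (by name: the statement is the Claim_ definitions above) =====
theorem can_match_all_spec : Claim_unchanged_can_match_all := by
  intro l1 l2 _ hD
  unfold D_can_match_all at hD
  rw [not_and_or, not_not] at hD
  rcases hD with h | h
  · -- A is true here, hence so is B
    have hA : can_match_all l1 l2 = true := (can_match_all_iff l1 l2).mpr h
    rw [hA, ((can_match_all_imp_alt l1 l2) hA)]
  · -- B is false here, hence so is A (contrapositive of A → B)
    have hB : can_match_all_alt l1 l2 = false := by
      rw [← Bool.not_eq_true, can_match_all_alt_iff]; exact h
    have hA : can_match_all l1 l2 = false := by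
      cases hAt : can_match_all l1 l2 with
      | false => rfl
      | true => rw [can_match_all_imp_alt l1 l2 hAt] at hB; simp at hB
    rw [hA, hB]

theorem can_match_all_changed : Claim_changed_can_match_all := by
  unfold Claim_changed_can_match_all
  refine ⟨by decide, by decide, by decide, ?_, by decide⟩
  show can_match_all_alt pvDiffWitness_can_match_all.1 pvDiffWitness_can_match_all.2 = true
  rw [can_match_all_alt_iff]
  decide

theorem can_match_all_tight : Claim_exact_can_match_all := by
  intro l1 l2 _ hD
  obtain ⟨h1, h2⟩ := hD
  have hA : can_match_all l1 l2 = false := by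
    rw [← Bool.not_eq_true, can_match_all_iff]; exact h1
  have hB : can_match_all_alt l1 l2 = true := (can_match_all_alt_iff l1 l2).mpr h2
  rw [hA, hB]
  exact Bool.false_ne_true
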